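-- pv_equiv track=rewrite | github.com/Ainaidris03/TutorCruncher | main.py | split_questions_answers
-- ===== SOURCE A (Python) =====
-- def split_questions_answers(quiz):
--     lines = quiz.split('\n')
--     questions = []
--     answers = []
--
--     current_q = ""
--     current_a = ""
--
--     for line in lines:
--         if line.startswith('Q'):
--             if current_q:
--                 questions.append(current_q)
--                 answers.append(current_a)
--             current_q = line
--             current_a = ""
--         elif line.startswith('A'):
--             current_a = line
--
--     if current_q:
--         questions.append(current_q)
--         answers.append(current_a)
--
--     return '\n\n'.join(questions), '\n\n'.join(answers)
-- ===== SOURCE B (Python) =====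
-- def split_questions_answers(quiz):
--     # Build the (question, answer) records back-to-front: scan the lines in
--     # reverse, remembering the nearest following A-line ("pending") until the
--     # Q-line that owns it is reached; no boundary/end flush logic is needed.
--     records = []
--     pending = ""
--     for line in reversed(quiz.split('\n')):
--         if line.startswith('Q'):
--             records.append((line, pending))
--             pending = ""
--         elif line.startswith('A') and pending == "":
--             pending = line
--     records.reverse()
--     return '\n\n'.join(q for q, _ in records), '\n\n'.join(a for _, a in records)
-- ===== Notes on version B (the rewrite author's own statement) =====
-- stated objective: alternative
-- what changed: B builds (question, answer) records back-to-front by scanning the lines in reverse with a single pending-answer register, eliminating A's two parallel accumulators with duplicated boundary-and-end flush logic.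
import Mathlib
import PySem

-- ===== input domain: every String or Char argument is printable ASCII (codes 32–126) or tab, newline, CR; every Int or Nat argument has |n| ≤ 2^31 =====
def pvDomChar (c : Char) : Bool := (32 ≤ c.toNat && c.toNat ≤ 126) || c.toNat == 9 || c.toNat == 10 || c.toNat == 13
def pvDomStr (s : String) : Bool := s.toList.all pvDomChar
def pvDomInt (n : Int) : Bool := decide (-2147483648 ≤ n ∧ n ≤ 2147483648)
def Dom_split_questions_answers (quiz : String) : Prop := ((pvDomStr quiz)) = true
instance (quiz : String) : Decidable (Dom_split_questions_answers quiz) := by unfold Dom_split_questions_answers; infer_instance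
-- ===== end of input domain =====

-- B builds the (question, answer) records back-to-front in one reverse scan with a single
-- pending-answer register, replacing A's two parallel accumulators with flush logic (alternative).

-- ===== PORT A =====
-- loop body of A's 'for line in lines': state is (questions, answers, current_q, current_a)
def pvAStep (st : List String × List String × String × String) (line : String) :
    List String × List String × String × String :=
  if PySem.Str.startswith line "Q" then
    (if st.2.2.1 ≠ "" then (st.1 ++ [st.2.2.1], st.2.1 ++ [st.2.2.2], line, "")
     else (st.1, st.2.1, line, ""))
  else if PySem.Str.startswith line "A" then (st.1, st.2.1, st.2.2.1, line)
  else st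

-- A's final 'if current_q:' flush
def pvAFinish (st : List String × List String × String × String) :
    List String × List String :=
  ((if st.2.2.1 ≠ "" then st.1 ++ [st.2.2.1] else st.1),
   (if st.2.2.1 ≠ "" then st.2.1 ++ [st.2.2.2] else st.2.1))

def split_questions_answers (quiz : String) : String × String :=
  let lines := (PySem.Str.split? quiz "\n").getD []   -- sep "\n" ≠ "", so split? is always some
  let fin := pvAFinish (lines.foldl pvAStep ([], [], "", ""))
  (PySem.Str.join "\n\n" fin.1, PySem.Str.join "\n\n" fin.2)

-- ===== PORT B =====
-- loop body of B's 'for line in reversed(lines)': state is (records, pending)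
def pvBStep (st : List (String × String) × String) (line : String) :
    List (String × String) × String :=
  if PySem.Str.startswith line "Q" then (st.1 ++ [(line, st.2)], "")
  else if PySem.Str.startswith line "A" && st.2 == "" then (st.1, line)
  else st

def split_questions_answers_alt (quiz : String) : String × String :=
  let lines := (PySem.Str.split? quiz "\n").getD []   -- sep "\n" ≠ "", so split? is always some
  let st := (lines.reverse).foldl pvBStep ([], "")
  let records := st.1.reverse
  (PySem.Str.join "\n\n" (records.map Prod.fst), PySem.Str.join "\n\n" (records.map Prod.snd))

-- ===== PRECONDITION & SPEC =====
def Spec_split_questions_answers (quiz : String) (out : String × String) : Prop := out = split_questions_answers_alt quiz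
instance (quiz : String) (out : String × String) : Decidable (Spec_split_questions_answers quiz out) := by unfold Spec_split_questions_answers; infer_instance

-- ===== CLAIM (what is proved, stated in full; the proofs are below) =====
def Claim_equal_split_questions_answers : Prop := ∀ (quiz : String), Dom_split_questions_answers quiz → Spec_split_questions_answers quiz (split_questions_answers quiz)

-- ===== LEMMAS AND PROOFS =====

-- structural (foldr) form of B's reverse scan
def goB : List String → List (String × String) × String
  | [] => ([], "")
  | l :: ls =>
    let r := goB ls
    if PySem.Str.startswith l "Q" then ((l, r.2) :: r.1, "")
    else if PySem.Str.startswith l "A" && r.2 == "" then (r.1, l)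
    else r

theorem ne_empty_of_startswith (l p : String) (hp : p.toList ≠ [])
    (h : PySem.Str.startswith l p = true) : l ≠ "" := by
  rintro rfl
  have h' : PySem.Chars.startswith ("" : String).toList p.toList = true := by simpa using h
  have := (PySem.Chars.startswith_iff _ _).mp h'
  exact hp (List.prefix_nil.mp (by simpa using this))

theorem foldB_eq (lines : List String) :
    (lines.reverse).foldl pvBStep ([], "") = ((goB lines).1.reverse, (goB lines).2) := by
  rw [List.foldl_reverse]
  induction lines with
  | nil => simp [goB]
  | cons l ls ih =>
    simp only [List.foldr_cons, ih]
    by_cases hQ : PySem.Chars.startswith l.toList ['Q'] = true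
    · simp [goB, pvBStep, hQ]
    · by_cases hA : PySem.Chars.startswith l.toList ['A'] = true
      · by_cases hp : (goB ls).2 = "" <;> simp [goB, pvBStep, hQ, hA, hp]
      · simp [goB, pvBStep, hQ, hA]

theorem mainA (lines : List String) (qs as : List String) (cq ca : String) :
    pvAFinish (lines.foldl pvAStep (qs, as, cq, ca)) =
      (qs ++ (if cq = "" then (goB lines).1.map Prod.fst else cq :: (goB lines).1.map Prod.fst),
       as ++ (if cq = "" then (goB lines).1.map Prod.snd
              else (if (goB lines).2 = "" then ca else (goB lines).2) :: (goB lines).1.map Prod.snd)) := by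
  induction lines generalizing qs as cq ca with
  | nil =>
    by_cases hc : cq = "" <;> simp [goB, pvAFinish, hc]
  | cons l ls ih =>
    simp only [List.foldl_cons, goB]
    by_cases hQ : PySem.Chars.startswith l.toList ['Q'] = true
    · have hl : l ≠ "" := ne_empty_of_startswith l "Q" (by decide) (by simpa using hQ)
      have hp : (if (goB ls).2 = "" then ("" : String) else (goB ls).2) = (goB ls).2 := by
        by_cases h : (goB ls).2 = "" <;> simp [h]
      by_cases hc : cq = ""
      · simp [pvAStep, hQ, hc, ih, hl, hp]
      · simp [pvAStep, hQ, hc, ih, hl, hp]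
    · by_cases hA : PySem.Chars.startswith l.toList ['A'] = true
      · have hl : l ≠ "" := ne_empty_of_startswith l "A" (by decide) (by simpa using hA)
        by_cases hp : (goB ls).2 = ""
        · simp [pvAStep, hQ, hA, ih, hl, hp]
        · simp [pvAStep, hQ, hA, ih, hp]
      · simp [pvAStep, hQ, hA, ih]

-- ===== VERDICT (by name: the statement is the Claim_ definition above) =====
theorem split_questions_answers_spec : Claim_equal_split_questions_answers := by
  intro quiz _
  unfold Spec_split_questions_answers split_questions_answers split_questions_answers_alt
  simp only [foldB_eq, mainA]
  simp
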